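-- pv_equiv track=rewrite | github.com/jiyali/python-offer | 海尔笔试题_得到最长全1子串方法数.py | getMaxOnes
-- ===== SOURCE A (Python) =====
-- def getMaxOnes(size, allowedChanges, str):
--     n = size
--     k = allowedChanges
--     num = list(map(int, str.split()))
--
--     zeros = res = l = 0
--     for r in range(n):
--         zeros += 1 - num[r]
--         if zeros > k:
--             zeros -= 1 - num[l]
--             l += 1
--         res = r - l + 1
--     return res
-- ===== SOURCE B (Python) =====
-- def getMaxOnes(size, allowedChanges, str):
--     num = list(map(int, str.split()))
--     P = [0]
--     for x in num:
--         P.append(P[-1] + 1 - x)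
--     res = 0
--     for r in range(size):
--         target = P[r + 1] - allowedChanges
--         lo, hi = 0, r + 1
--         while lo < hi:
--             mid = (lo + hi) // 2
--             if P[mid] >= target:
--                 hi = mid
--             else:
--                 lo = mid + 1
--         if P[lo] >= target and r + 1 - lo > res:
--             res = r + 1 - lo
--     return res
-- ===== Notes on version B (the rewrite author's own statement) =====
-- stated objective: alternative
-- what changed: Replaces A's non-shrinking sliding window (single pass with a lazily advancing left pointer and no max) by a prefix-sum-of-zeros array plus, for each right end, a hand-written binary search for the leftmost window with at most k zeros, taking an explicit running maximum.
-- outside the precondition, e.g. on getMaxOnes(3, 0, '0 2 3 1 0'): A returns 2, B returns 3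
import Mathlib
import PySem

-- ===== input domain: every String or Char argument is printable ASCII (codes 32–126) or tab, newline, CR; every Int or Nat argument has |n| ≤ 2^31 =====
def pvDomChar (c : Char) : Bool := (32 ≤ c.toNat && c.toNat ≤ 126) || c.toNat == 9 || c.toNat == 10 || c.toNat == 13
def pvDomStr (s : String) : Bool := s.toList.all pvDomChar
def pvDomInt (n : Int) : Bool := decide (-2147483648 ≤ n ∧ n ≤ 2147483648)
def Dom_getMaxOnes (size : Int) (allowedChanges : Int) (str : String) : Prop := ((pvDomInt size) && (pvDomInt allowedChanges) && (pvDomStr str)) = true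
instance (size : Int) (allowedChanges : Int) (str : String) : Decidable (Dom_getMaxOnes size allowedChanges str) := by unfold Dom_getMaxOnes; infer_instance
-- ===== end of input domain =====

-- B replaces A's non-shrinking sliding window by a prefix-sum array of zero-counts plus a
-- per-right-end binary search for the leftmost valid window, with an explicit running maximum
-- (alternative decomposition; not faster).

-- ===== PORT A =====
-- shared parsing helper: num = list(map(int, str.split())); int(t) raises ValueError on a bad
-- token, so Pre_ requires every token to parse and the `getD 0` default is never reached there.
def pvParse (str : String) : List Int :=
  (PySem.Str.split₀ str).map (fun t => (PySem.Int.ofStr? t).getD 0)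

-- literal port of A: zeros/res/l state folded over range(n); num[r]/num[l] are in range under
-- Pre_ (size ≤ token count), so pyGetD's default is never reached there.
def getMaxOnes (size : Int) (allowedChanges : Int) (str : String) : Int :=
  let n := size
  let k := allowedChanges
  let num := pvParse str
  let st := (PySem.List.pyRange 0 n 1).foldl
    (fun (st : Int × Int × Int) r =>
      let zeros := st.1 + 1 - PySem.List.pyGetD num r 0
      let l := st.2.2
      if zeros > k then
        (zeros - (1 - PySem.List.pyGetD num l 0), r - (l + 1) + 1, l + 1)
      else
        (zeros, r - l + 1, l))
    (0, 0, 0)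
  st.2.1

-- ===== PORT B =====
-- the hand-written binary search of Source B: while lo < hi: mid = (lo+hi)//2; ...
def pvBisect (P : List Int) (target : Int) (lo hi : Int) : Int :=
  if h : lo < hi then
    let mid := PySem.Int.floordiv (lo + hi) 2
    if target ≤ PySem.List.pyGetD P mid 0 then pvBisect P target lo mid
    else pvBisect P target (mid + 1) hi
  else lo
termination_by (hi - lo).toNat
decreasing_by
  · have h2 : PySem.Int.floordiv (lo + hi) 2 < hi := by
      rw [PySem.Int.floordiv_lt_iff_lt_mul (by omega)]; omega
    omega
  · have h1 := (PySem.Int.floordiv_two_mid_bounds (le_of_lt h)).1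
    omega

def getMaxOnes_alt (size : Int) (allowedChanges : Int) (str : String) : Int :=
  let num := pvParse str
  let P := num.foldl (fun acc x => acc ++ [PySem.List.pyGetD acc (-1) 0 + 1 - x]) [(0 : Int)]
  (PySem.List.pyRange 0 size 1).foldl
    (fun res r =>
      let target := PySem.List.pyGetD P (r + 1) 0 - allowedChanges
      let lo := pvBisect P target 0 (r + 1)
      if target ≤ PySem.List.pyGetD P lo 0 ∧ res < r + 1 - lo then r + 1 - lo else res)
    0

-- ===== PRECONDITION & SPEC =====
-- Pre_ restricts to the function's natural domain of 0/1 sequences (any token ≤ 1 is admitted):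
-- on a token > 1 A's zero-count `zeros += 1 - num[r]` goes negative and its window bookkeeping
-- returns an accidental value; tokens that do not parse as int (ValueError) and size larger than
-- the token count (IndexError) make A raise.
def Pre_getMaxOnes (size : Int) (allowedChanges : Int) (str : String) : Prop :=
  (∀ t ∈ PySem.Str.split₀ str, (PySem.Int.ofStr? t).isSome = true) ∧
  (∀ t ∈ PySem.Str.split₀ str, (PySem.Int.ofStr? t).getD 0 ≤ 1) ∧
  size ≤ ((PySem.Str.split₀ str).length : Int)
instance (size : Int) (allowedChanges : Int) (str : String) : Decidable (Pre_getMaxOnes size allowedChanges str) := by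
  unfold Pre_getMaxOnes; infer_instance

def pvWitness_getMaxOnes : Int × Int × String := (6, 1, "1 0 1 1 0 1")

def Spec_getMaxOnes (size : Int) (allowedChanges : Int) (str : String) (out : Int) : Prop := out = getMaxOnes_alt size allowedChanges str
instance (size : Int) (allowedChanges : Int) (str : String) (out : Int) : Decidable (Spec_getMaxOnes size allowedChanges str out) := by unfold Spec_getMaxOnes; infer_instance

-- ===== CLAIM (what is proved, stated in full; the proofs are below) =====
def Claim_equal_getMaxOnes : Prop := ∀ (size : Int) (allowedChanges : Int) (str : String), Dom_getMaxOnes size allowedChanges str → Pre_getMaxOnes size allowedChanges str → Spec_getMaxOnes size allowedChanges str (getMaxOnes size allowedChanges str)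


-- ===== LEMMAS AND PROOFS =====

-- prefix count of "zeros" (weights 1 - x) over the first j elements
def pvP (num : List Int) (j : Nat) : Int := ((num.take j).map (fun x => (1 : Int) - x)).sum

-- A's left pointer after processing the first j elements
def pvL (num : List Int) (k : Int) : Nat → Nat
  | 0 => 0
  | j + 1 =>
    let l := pvL num k j
    if k < pvP num (j + 1) - pvP num l then l + 1 else l

-- the values of B's prefix list, tail-first, starting from running value s
def pvPl (s : Int) : List Int → List Int
  | [] => []
  | x :: xs => (s + 1 - x) :: pvPl (s + 1 - x) xs

lemma pvP_zero (num : List Int) : pvP num 0 = 0 := by simp [pvP]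

lemma pvP_succ (num : List Int) (j : Nat) (hj : j < num.length) :
    pvP num (j + 1) = pvP num j + (1 - num[j]) := by
  unfold pvP
  rw [List.map_take, List.map_take, List.take_add_one]
  have hj' : j < (num.map (fun x => (1 : Int) - x)).length := by simpa using hj
  rw [List.getElem?_eq_getElem hj']
  simp

lemma pvP_cons (x : Int) (xs : List Int) (j : Nat) :
    pvP (x :: xs) (j + 1) = (1 - x) + pvP xs j := by
  simp [pvP, List.take_succ_cons]

lemma pvL_le (num : List Int) (k : Int) (j : Nat) : pvL num k j ≤ j := by
  induction j with
  | zero => simp [pvL]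
  | succ j ih => simp only [pvL]; split <;> omega

lemma pvP_mono (num : List Int) (hle : ∀ x ∈ num, x ≤ 1) (i j : Nat)
    (hij : i ≤ j) (hj : j ≤ num.length) : pvP num i ≤ pvP num j := by
  induction j with
  | zero =>
    have : i = 0 := by omega
    subst this; exact le_refl _
  | succ j ih =>
    rcases Nat.lt_or_ge i (j + 1) with h | h
    · have hjlen : j < num.length := by omega
      have hx : num[j] ≤ 1 := hle _ (List.getElem_mem hjlen)
      have := pvP_succ num j hjlen
      have hi : pvP num i ≤ pvP num j := ih (by omega) (by omega)
      omega
    · have : i = j + 1 := by omega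
      subst this
      exact le_refl _

lemma pvL_inv (num : List Int) (k : Int) (hle : ∀ x ∈ num, x ≤ 1) (j : Nat)
    (hj : j ≤ num.length) : ∀ i : Nat, i < pvL num k j → k < pvP num j - pvP num i := by
  induction j with
  | zero => intro i hi; simp [pvL] at hi
  | succ j ih =>
    intro i hi
    have hstep : pvP num j ≤ pvP num (j + 1) := pvP_mono num hle j (j + 1) (by omega) hj
    simp only [pvL] at hi
    split at hi
    · rename_i hcond
      rcases Nat.lt_or_ge i (pvL num k j) with h | h
      · have := ih (by omega) i h; omega
      · have : i = pvL num k j := by omega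
        subst this; exact hcond
    · have := ih (by omega) i hi; omega

-- A's fold computes (zeros, res, l) = (P n - P lA(n), n - lA(n), lA(n))
lemma A_fold (num : List Int) (k : Int) (n : Nat) (hn : n ≤ num.length) :
    ((PySem.List.pyRange 0 (n : Int) 1).foldl
      (fun (st : Int × Int × Int) r =>
        let zeros := st.1 + 1 - PySem.List.pyGetD num r 0
        let l := st.2.2
        if zeros > k then
          (zeros - (1 - PySem.List.pyGetD num l 0), r - (l + 1) + 1, l + 1)
        else
          (zeros, r - l + 1, l))
      (0, 0, 0))
    = (pvP num n - pvP num (pvL num k n), ((n : Int) - (pvL num k n : Int), ((pvL num k n : Int)))) := by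
  induction n with
  | zero =>
    rw [PySem.List.pyRange_one_eq_nil (by omega)]
    simp [pvP_zero, pvL]
  | succ n ih =>
    have hcast : (((n + 1 : Nat)) : Int) = (n : Int) + 1 := by push_cast; ring
    rw [hcast, PySem.List.pyRange_one_succ_right (by omega), List.foldl_append,
      ih (by omega), List.foldl_cons, List.foldl_nil]
    have hnlen : n < num.length := by omega
    have hllen : pvL num k n < num.length := by
      have := pvL_le num k n; omega
    have hgr : PySem.List.pyGetD num ((n : Nat) : Int) 0 = num[n] := by
      rw [PySem.List.pyGetD_natCast]; exact List.getD_eq_getElem _ _ hnlen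
    have hgl : PySem.List.pyGetD num ((pvL num k n : Nat) : Int) 0 = num[pvL num k n] := by
      rw [PySem.List.pyGetD_natCast]; exact List.getD_eq_getElem _ _ hllen
    have hz : pvP num n - pvP num (pvL num k n) + 1 - num[n] = pvP num (n + 1) - pvP num (pvL num k n) := by
      have := pvP_succ num n hnlen; omega
    simp only [hgr, hgl, hz]
    by_cases hc : k < pvP num (n + 1) - pvP num (pvL num k n)
    · rw [if_pos (by omega)]
      have hLs : pvL num k (n + 1) = pvL num k n + 1 := by
        simp only [pvL]; rw [if_pos hc]
      have hPs : pvP num (pvL num k n + 1) = pvP num (pvL num k n) + (1 - num[pvL num k n]) :=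
        pvP_succ num (pvL num k n) hllen
      rw [hLs]
      refine Prod.ext ?_ (Prod.ext ?_ ?_) <;> simp <;> omega
    · rw [if_neg (by omega)]
      have hLs : pvL num k (n + 1) = pvL num k n := by
        simp only [pvL]; rw [if_neg hc]
      rw [hLs]
      refine Prod.ext ?_ (Prod.ext ?_ ?_) <;> simp <;> omega

lemma pvPl_build (num pre : List Int) (x0 : Int) :
    (num.foldl (fun acc x => acc ++ [PySem.List.pyGetD acc (-1) 0 + 1 - x]) (pre ++ [x0]))
    = (pre ++ [x0]) ++ pvPl x0 num := by
  induction num generalizing pre x0 with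
  | nil => simp [pvPl]
  | cons x xs ih =>
    simp only [List.foldl_cons, PySem.List.pyGetD_neg_one_append_singleton, pvPl]
    have := ih (pre ++ [x0]) (x0 + 1 - x)
    simp only [List.append_assoc] at this ⊢
    exact this

lemma pvPl_get (num : List Int) (s : Int) (j : Nat) (hj : j < num.length) :
    (pvPl s num)[j]? = some (s + pvP num (j + 1)) := by
  induction num generalizing s j with
  | nil => simp at hj
  | cons x xs ih =>
    cases j with
    | zero => simp [pvPl, pvP_cons, pvP_zero]; ring
    | succ j =>
      simp only [pvPl, List.getElem?_cons_succ]
      rw [ih (s + 1 - x) j (by simpa using hj), pvP_cons]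
      congr 1; ring

lemma pvPget (num : List Int) (j : Nat) (hj : j ≤ num.length) :
    PySem.List.pyGetD (0 :: pvPl 0 num) ((j : Nat) : Int) 0 = pvP num j := by
  rw [PySem.List.pyGetD_natCast]
  cases j with
  | zero => simp [pvP_zero, List.getD]
  | succ j =>
    have := pvPl_get num 0 j (by omega)
    simp [List.getD, this]

lemma pvBisect_spec (Pl : List Int) (target hi0 : Int)
    (hmono : ∀ i j : Int, 0 ≤ i → i ≤ j → j ≤ hi0 →
      PySem.List.pyGetD Pl i 0 ≤ PySem.List.pyGetD Pl j 0) :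
    ∀ (lo hi : Int), 0 ≤ lo → lo ≤ hi → hi ≤ hi0 →
    (∀ i : Int, 0 ≤ i → i < lo → PySem.List.pyGetD Pl i 0 < target) →
    (∀ i : Int, hi ≤ i → i < hi0 → target ≤ PySem.List.pyGetD Pl i 0) →
    lo ≤ pvBisect Pl target lo hi ∧ pvBisect Pl target lo hi ≤ hi ∧
    (∀ i : Int, 0 ≤ i → i < pvBisect Pl target lo hi → PySem.List.pyGetD Pl i 0 < target) ∧
    (∀ i : Int, pvBisect Pl target lo hi ≤ i → i < hi0 → target ≤ PySem.List.pyGetD Pl i 0) := by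
  intro lo hi
  generalize hfuel : (hi - lo).toNat = fuel
  induction fuel using Nat.strong_induction_on generalizing lo hi with
  | _ fuel ihf =>
  intro hlo0 hlohi hhi0 hlow hhigh
  rw [pvBisect]
  by_cases h : lo < hi
  · rw [dif_pos h]
    have hmid := PySem.Int.floordiv_two_mid_bounds (le_of_lt h)
    set mid := PySem.Int.floordiv (lo + hi) 2 with hmiddef
    have hmidlt : mid < hi := by
      rw [hmiddef, PySem.Int.floordiv_lt_iff_lt_mul (by omega)]; omega
    by_cases hg : target ≤ PySem.List.pyGetD Pl mid 0
    · rw [if_pos hg]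
      have hrec := ihf (mid - lo).toNat (by omega) lo mid rfl hlo0 (by omega) (by omega) hlow ?_
      · exact ⟨hrec.1, by omega, hrec.2.2⟩
      · intro i hi1 hi2
        exact le_trans hg (hmono mid i (by omega) hi1 (by omega))
    · rw [if_neg hg]
      have hg' : PySem.List.pyGetD Pl mid 0 < target := by omega
      have hrec := ihf (hi - (mid + 1)).toNat (by omega) (mid + 1) hi rfl (by omega) (by omega) hhi0 ?_ hhigh
      · exact ⟨by omega, hrec.2.1, hrec.2.2⟩
      · intro i hi1 hi2
        have : PySem.List.pyGetD Pl i 0 ≤ PySem.List.pyGetD Pl mid 0 :=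
          hmono i mid hi1 (by omega) (by omega)
        omega
  · rw [dif_neg h]
    have : lo = hi := by omega
    exact ⟨le_refl _, by omega, hlow, by rw [this]; exact hhigh⟩

-- B's fold computes n - lA(n)
lemma B_fold (num : List Int) (k : Int) (hle : ∀ x ∈ num, x ≤ 1) (n : Nat)
    (hn : n ≤ num.length) :
    ((PySem.List.pyRange 0 (n : Int) 1).foldl
      (fun res r =>
        let target := PySem.List.pyGetD (0 :: pvPl 0 num) (r + 1) 0 - k
        let lo := pvBisect (0 :: pvPl 0 num) target 0 (r + 1)
        if target ≤ PySem.List.pyGetD (0 :: pvPl 0 num) lo 0 ∧ res < r + 1 - lo then r + 1 - lo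
        else res)
      0)
    = (n : Int) - (pvL num k n : Int) := by
  induction n with
  | zero =>
    rw [PySem.List.pyRange_one_eq_nil (by omega)]
    simp [pvL]
  | succ n ih =>
    have hn1 : n + 1 ≤ num.length := hn
    have hcast : (((n + 1 : Nat)) : Int) = (n : Int) + 1 := by push_cast; ring
    rw [hcast, PySem.List.pyRange_one_succ_right (by omega), List.foldl_append,
      ih (by omega), List.foldl_cons, List.foldl_nil]
    have hget : ∀ i : Int, 0 ≤ i → i ≤ (n : Int) + 1 →
        PySem.List.pyGetD (0 :: pvPl 0 num) i 0 = pvP num i.toNat := by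
      intro i h0 h1
      have : i = ((i.toNat : Nat) : Int) := by omega
      rw [this]
      exact pvPget num i.toNat (by omega)
    have hmono : ∀ i j : Int, 0 ≤ i → i ≤ j → j ≤ (n : Int) + 1 →
        PySem.List.pyGetD (0 :: pvPl 0 num) i 0 ≤ PySem.List.pyGetD (0 :: pvPl 0 num) j 0 := by
      intro i j h0 hij hj
      rw [hget i h0 (by omega), hget j (by omega) hj]
      exact pvP_mono num hle i.toNat j.toNat (by omega) (by omega)
    have htgt : PySem.List.pyGetD (0 :: pvPl 0 num) ((n : Int) + 1) 0 = pvP num (n + 1) := by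
      rw [hget ((n : Int) + 1) (by omega) (by omega)]
      congr 1
    have hspec := pvBisect_spec (0 :: pvPl 0 num) (pvP num (n + 1) - k) ((n : Int) + 1) hmono
      0 ((n : Int) + 1) (by omega) (by omega) (by omega)
      (by intro i h1 h2; omega) (by intro i h1 h2; omega)
    simp only [htgt]
    set r := pvBisect (0 :: pvPl 0 num) (pvP num (n + 1) - k) 0 ((n : Int) + 1) with hrdef
    obtain ⟨hr0, hr1, hlow, hhigh⟩ := hspec
    have hl_le : pvL num k n ≤ n := pvL_le num k n
    have hinv := pvL_inv num k hle (n + 1) hn1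
    have hgetL : PySem.List.pyGetD (0 :: pvPl 0 num) ((pvL num k n : Int)) 0 = pvP num (pvL num k n) := by
      rw [hget ((pvL num k n : Int)) (by omega) (by omega)]
      simp
    by_cases hc : k < pvP num (n + 1) - pvP num (pvL num k n)
    ·  -- branch fired in A: left pointer advances, B takes no new maximum
      have hLs : pvL num k (n + 1) = pvL num k n + 1 := by
        simp only [pvL]; rw [if_pos hc]
      have hnot : ¬(pvP num (n + 1) - k ≤ PySem.List.pyGetD (0 :: pvPl 0 num) r 0 ∧
          (n : Int) - (pvL num k n : Int) < (n : Int) + 1 - r) := by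
        rintro ⟨hguard, hcand⟩
        have hrl : r ≤ (pvL num k n : Int) := by omega
        have := hhigh ((pvL num k n : Int)) hrl (by omega)
        omega
      rw [if_neg hnot, hLs]
      push_cast; omega
    ·  -- branch not fired: A's window grows by one, B finds r = pvL n and updates
      have hLs : pvL num k (n + 1) = pvL num k n := by
        simp only [pvL]; rw [if_neg hc]
      rw [hLs] at hinv
      have hrle : r ≤ (pvL num k n : Int) := by
        by_contra hgt
        have := hlow ((pvL num k n : Int)) (by omega) (by omega)
        omega
      have hrge : (pvL num k n : Int) ≤ r := by
        by_contra hlt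
        have h1 := hinv r.toNat (by omega)
        have h2 := hhigh r (le_refl _) (by omega)
        rw [hget r (by omega) (by omega)] at h2
        omega
      have hreq : r = (pvL num k n : Int) := le_antisymm hrle hrge
      have hyes : (pvP num (n + 1) - k ≤ PySem.List.pyGetD (0 :: pvPl 0 num) r 0 ∧
          (n : Int) - (pvL num k n : Int) < (n : Int) + 1 - r) := by
        rw [hreq, hgetL]
        omega
      rw [if_pos hyes, hreq, hLs]

-- ===== VERDICT (by name: the statement is the Claim_ definition above) =====
theorem getMaxOnes_spec : Claim_equal_getMaxOnes := by
  intro size allowedChanges str _hdom hpre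
  obtain ⟨_hparse, hle', hsize⟩ := hpre
  have hle : ∀ x ∈ pvParse str, x ≤ 1 := by
    intro x hx
    unfold pvParse at hx
    obtain ⟨t, ht, rfl⟩ := List.mem_map.mp hx
    exact hle' t ht
  have hbuild : (pvParse str).foldl
      (fun acc x => acc ++ [PySem.List.pyGetD acc (-1) 0 + 1 - x]) [(0 : Int)]
      = 0 :: pvPl 0 (pvParse str) := by
    simpa using pvPl_build (pvParse str) [] 0
  show getMaxOnes size allowedChanges str = getMaxOnes_alt size allowedChanges str
  unfold getMaxOnes getMaxOnes_alt
  simp only [hbuild]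
  by_cases hs : size ≤ 0
  · rw [PySem.List.pyRange_one_eq_nil hs]
    simp
  · push Not at hs
    obtain ⟨n, rfl⟩ : ∃ n : Nat, size = (n : Int) := ⟨size.toNat, by omega⟩
    have hn : n ≤ (pvParse str).length := by
      have : (pvParse str).length = (PySem.Str.split₀ str).length := by
        simp [pvParse]
      omega
    exact (congrArg (fun p => p.2.1) (A_fold (pvParse str) allowedChanges n hn)).trans
      (B_fold (pvParse str) allowedChanges hle n hn).symm
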